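-- pv_equiv track=rewrite | github.com/brokenbartender/GEMOP | scripts/redbubble_profit_harness.py | concept_variants
-- ===== SOURCE A (Python) =====
-- from typing import Any, Dict, List, Optional, Tuple
--
-- def concept_variants(theme: str, count: int) -> List[str]:
--     base = theme.strip() or "minimal geometric symbol"
--     suffixes = [
--         "minimal line sigil",
--         "bold emblem linework",
--         "clean monoline crest",
--         "high-contrast icon set",
--         "geometric heritage seal",
--         "vintage badge line art",
--         "gift-ready minimalist mark",
--         "symbolic abstract stamp",
--     ]
--     out = []
--     for i in range(max(1, count)):
--         sfx = suffixes[i % len(suffixes)]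
--         out.append(f"{base} {sfx}")
--     return out
-- ===== SOURCE B (Python) =====
-- def concept_variants(theme, count):
--     base = theme.strip() or "minimal geometric symbol"
--     suffixes = [
--         "minimal line sigil",
--         "bold emblem linework",
--         "clean monoline crest",
--         "high-contrast icon set",
--         "geometric heritage seal",
--         "vintage badge line art",
--         "gift-ready minimalist mark",
--         "symbolic abstract stamp",
--     ]
--     labeled = [f"{base} {sfx}" for sfx in suffixes]
--     q, r = divmod(max(1, count), len(labeled))
--     return labeled * q + labeled[:r]
-- ===== Notes on version B (the rewrite author's own statement) =====
-- stated objective: faster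
-- what changed: Replaces the per-element modulo-indexed loop with building the eight labeled strings once and returning whole-list replication plus a remainder slice (labeled * q + labeled[:r] with q, r = divmod(max(1,count), 8)).
import Mathlib
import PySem

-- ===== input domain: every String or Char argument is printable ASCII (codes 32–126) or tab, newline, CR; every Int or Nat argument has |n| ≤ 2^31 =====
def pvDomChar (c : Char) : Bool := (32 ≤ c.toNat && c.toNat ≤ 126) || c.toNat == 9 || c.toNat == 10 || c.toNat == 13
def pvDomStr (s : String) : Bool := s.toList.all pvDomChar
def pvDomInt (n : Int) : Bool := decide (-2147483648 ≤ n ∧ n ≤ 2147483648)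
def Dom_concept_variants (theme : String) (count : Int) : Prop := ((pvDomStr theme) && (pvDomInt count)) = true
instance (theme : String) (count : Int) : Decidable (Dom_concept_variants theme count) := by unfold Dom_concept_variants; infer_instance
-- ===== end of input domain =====

-- B replaces A's per-element modulo-indexed loop by building the 8 labeled strings
-- once and returning whole-list replication plus a remainder slice (constant-factor change).

def pvSuffixes : List String :=
  [ "minimal line sigil",
    "bold emblem linework",
    "clean monoline crest",
    "high-contrast icon set",
    "geometric heritage seal",
    "vintage badge line art",
    "gift-ready minimalist mark",
    "symbolic abstract stamp" ]

-- ===== PORT A =====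
def concept_variants (theme : String) (count : Int) : List String :=
  let base := if PySem.Str.strip theme = "" then "minimal geometric symbol" else PySem.Str.strip theme
  let suffixes := pvSuffixes
  (PySem.List.pyRange 0 (max 1 count) 1).foldl
    (fun out i =>
      out ++ [base ++ " " ++ PySem.List.pyGetD suffixes (PySem.Int.mod i (suffixes.length : Int)) ""])
    []

-- ===== PORT B =====
def concept_variants_alt (theme : String) (count : Int) : List String :=
  let base := if PySem.Str.strip theme = "" then "minimal geometric symbol" else PySem.Str.strip theme
  let labeled := pvSuffixes.map (fun sfx => base ++ " " ++ sfx)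
  let q := PySem.Int.floordiv (max 1 count) (labeled.length : Int)
  let r := PySem.Int.mod (max 1 count) (labeled.length : Int)
  (List.replicate q.toNat labeled).flatten ++ PySem.List.slice labeled none (some r)

-- ===== PRECONDITION & SPEC =====
def Spec_concept_variants (theme : String) (count : Int) (out : List String) : Prop := out = concept_variants_alt theme count
instance (theme : String) (count : Int) (out : List String) : Decidable (Spec_concept_variants theme count out) := by unfold Spec_concept_variants; infer_instance

-- ===== CLAIM (what is proved, stated in full; the proofs are below) =====
def Claim_equal_concept_variants : Prop := ∀ (theme : String) (count : Int), Dom_concept_variants theme count → Spec_concept_variants theme count (concept_variants theme count)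

-- ===== LEMMAS AND PROOFS =====

-- Modular indexing over an initial segment of ℕ is whole-copy replication plus a remainder prefix.
theorem pvCycle (L : List String) (d : String) (hk : L.length = 8) (m : Nat) :
    (List.range m).map (fun j => L.getD (j % 8) d)
      = (List.replicate (m / 8) L).flatten ++ L.take (m % 8) := by
  induction m with
  | zero => simp
  | succ m ih =>
    have hlt : m % 8 < 8 := Nat.mod_lt _ (by omega)
    have hget : L.getD (m % 8) d = L[m % 8]'(by omega) := by
      rw [List.getD_eq_getElem _ _ (by omega)]
    have htake : L.take (m % 8 + 1) = L.take (m % 8) ++ [L[m % 8]'(by omega)] := by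
      rw [List.take_add_one]
      simp [List.getElem?_eq_getElem (by omega : m % 8 < L.length)]
    rw [List.range_succ, List.map_append, ih]
    by_cases hc : m % 8 + 1 = 8
    · have hdiv : (m + 1) / 8 = m / 8 + 1 := by omega
      have hmod : (m + 1) % 8 = 0 := by omega
      rw [hdiv, hmod, List.replicate_succ', List.flatten_append]
      simp only [List.map_cons, List.map_nil, List.append_assoc, hget]
      rw [← htake, hc, ← hk, List.take_length]
      simp
    · have hdiv : (m + 1) / 8 = m / 8 := by omega
      have hmod : (m + 1) % 8 = m % 8 + 1 := by omega
      rw [hdiv, hmod, htake]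
      simp [List.getElem?_eq_getElem (show m % 8 < L.length by omega)]

theorem concept_variants_eq_alt (theme : String) (count : Int) :
    concept_variants theme count = concept_variants_alt theme count := by
  simp only [concept_variants, concept_variants_alt]
  have hlen : pvSuffixes.length = 8 := by decide
  set base := if PySem.Str.strip theme = "" then "minimal geometric symbol" else PySem.Str.strip theme with hbase
  have hn : max 1 count = ((max 1 count).toNat : Int) := by omega
  set m := (max 1 count).toNat with hm
  rw [hn]
  rw [PySem.List.pyRange_zero_natCast]
  rw [PySem.List.foldl_append_singleton_eq_map]
  have hfd : PySem.Int.floordiv (m : Int) ((pvSuffixes.map (fun sfx => base ++ " " ++ sfx)).length : Int)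
      = ((m / 8 : Nat) : Int) := by
    simp only [List.length_map, hlen]
    exact_mod_cast PySem.Int.floordiv_natCast m 8
  have hmd : PySem.Int.mod (m : Int) ((pvSuffixes.map (fun sfx => base ++ " " ++ sfx)).length : Int)
      = ((m % 8 : Nat) : Int) := by
    simp only [List.length_map, hlen]
    exact_mod_cast PySem.Int.mod_natCast m 8
  rw [hfd, hmd, PySem.List.slice_to_natCast, Int.toNat_natCast]
  rw [List.map_map]
  have hstep : ((fun i => base ++ " " ++ PySem.List.pyGetD pvSuffixes (PySem.Int.mod i (pvSuffixes.length : Int)) "") ∘ (fun j : Nat => (j : Int)))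
      = fun j : Nat => (pvSuffixes.map (fun sfx => base ++ " " ++ sfx)).getD (j % 8) "" := by
    funext j
    have hjm : j % 8 < 8 := Nat.mod_lt _ (by omega)
    simp only [Function.comp, hlen]
    have : PySem.Int.mod (j : Int) ((8 : Nat) : Int) = ((j % 8 : Nat) : Int) :=
      PySem.Int.mod_natCast j 8
    rw [this, PySem.List.pyGetD_natCast]
    rw [List.getD_eq_getElem _ _ (by omega), List.getD_eq_getElem _ _ (by simpa using hjm)]
    simp
  rw [hstep]
  exact pvCycle _ "" (by simp [hlen]) m

-- ===== VERDICT (by name: the statement is the Claim_ definition above) =====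
theorem concept_variants_spec : Claim_equal_concept_variants := by
  intro theme count _
  exact concept_variants_eq_alt theme count
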